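-- pv_equiv track=rewrite | github.com/dp-IED/psychohistory | baselines/graph_builder_stage1_train.py | _positive_nodes_in_retrieved
-- ===== SOURCE A (Python) =====
-- def _positive_nodes_in_retrieved(R: set[int], pair_set: set[tuple[int, int]]) -> set[int]:
--     """Nodes in ``R`` that participate in at least one precomputed pair with another node in ``R``."""
--     pos: set[int] = set()
--     for g in R:
--         for h in R:
--             if h == g:
--                 continue
--             a, b = (g, h) if g < h else (h, g)
--             if (a, b) in pair_set:
--                 pos.add(g)
--                 break
--     return pos
-- ===== SOURCE B (Python) =====
-- def _positive_nodes_in_retrieved(R: set[int], pair_set: set[tuple[int, int]]) -> set[int]: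
--     """Nodes in ``R`` that participate in at least one precomputed pair with another node in ``R``."""
--     pos: set[int] = set()
--     for a, b in pair_set:
--         if a < b and a in R and b in R:
--             pos.add(a)
--             pos.add(b)
--     return R & pos
-- ===== Notes on version B (the rewrite author's own statement) =====
-- stated objective: faster
-- what changed: Instead of scanning all ordered pairs of R and probing pair_set for each (O(|R|^2)), B makes one pass over pair_set, collects both endpoints of every pair whose two (ordered) endpoints lie in R, and intersects with R.
import Mathlib
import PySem

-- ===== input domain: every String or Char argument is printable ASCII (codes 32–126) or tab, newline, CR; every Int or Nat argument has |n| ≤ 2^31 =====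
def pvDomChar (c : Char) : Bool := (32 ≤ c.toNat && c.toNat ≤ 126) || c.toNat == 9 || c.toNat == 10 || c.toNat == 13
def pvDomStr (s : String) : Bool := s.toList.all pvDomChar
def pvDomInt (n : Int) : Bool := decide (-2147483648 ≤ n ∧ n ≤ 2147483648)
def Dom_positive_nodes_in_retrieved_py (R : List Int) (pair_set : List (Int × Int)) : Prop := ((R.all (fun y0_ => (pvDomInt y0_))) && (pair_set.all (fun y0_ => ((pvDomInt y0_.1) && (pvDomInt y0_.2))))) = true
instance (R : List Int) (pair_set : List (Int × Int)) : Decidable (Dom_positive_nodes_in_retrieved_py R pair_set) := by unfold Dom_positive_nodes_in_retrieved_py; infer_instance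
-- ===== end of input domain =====

-- B replaces A's O(|R|^2) double scan over R by a single pass over pair_set (collect endpoints
-- of pairs with both endpoints in R, then intersect with R); equivalence is about the returned set.

-- ===== PORT A =====
-- inner 'for h in R: … break' loop of A: true iff some h in the remaining list makes g positive
def pvFoundA (g : Int) (pair_set : List (Int × Int)) : List Int → Bool
  | [] => false
  | h :: rest =>
    if h = g then pvFoundA g pair_set rest
    else
      let ab := if g < h then (g, h) else (h, g)
      if ab ∈ pair_set then true else pvFoundA g pair_set rest

def positive_nodes_in_retrieved_py (R : List Int) (pair_set : List (Int × Int)) : List Int :=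
  R.foldl (fun pos g => if pvFoundA g pair_set R then PySem.Set.add pos g else pos)
    (PySem.Set.empty : PySem.Set Int)

-- ===== PORT B =====
def positive_nodes_in_retrieved_py_alt (R : List Int) (pair_set : List (Int × Int)) : List Int :=
  let pos : PySem.Set Int := pair_set.foldl
    (fun pos p =>
      if p.1 < p.2 ∧ p.1 ∈ R ∧ p.2 ∈ R then PySem.Set.add (PySem.Set.add pos p.1) p.2 else pos)
    PySem.Set.empty
  PySem.Set.inter R pos

-- ===== PRECONDITION & SPEC =====
-- Pre_ only demands that R denote a Python set (no duplicate elements), which every actual input does.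
def Pre_positive_nodes_in_retrieved_py (R : List Int) (pair_set : List (Int × Int)) : Prop := R.Nodup
instance (R : List Int) (pair_set : List (Int × Int)) : Decidable (Pre_positive_nodes_in_retrieved_py R pair_set) := by unfold Pre_positive_nodes_in_retrieved_py; infer_instance
def pvWitness_positive_nodes_in_retrieved_py : List Int × (List (Int × Int)) := ([1, 2, 3], [(1, 2)])

def Spec_positive_nodes_in_retrieved_py (R : List Int) (pair_set : List (Int × Int)) (out : List Int) : Prop := out = positive_nodes_in_retrieved_py_alt R pair_set
instance (R : List Int) (pair_set : List (Int × Int)) (out : List Int) : Decidable (Spec_positive_nodes_in_retrieved_py R pair_set out) := by unfold Spec_positive_nodes_in_retrieved_py; infer_instance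

-- ===== CLAIM (what is proved, stated in full; the proofs are below) =====
def Claim_equal_positive_nodes_in_retrieved_py : Prop := ∀ (R : List Int) (pair_set : List (Int × Int)), Dom_positive_nodes_in_retrieved_py R pair_set → Pre_positive_nodes_in_retrieved_py R pair_set → Spec_positive_nodes_in_retrieved_py R pair_set (positive_nodes_in_retrieved_py R pair_set)

-- ===== LEMMAS AND PROOFS =====

-- membership in B's accumulated endpoint set
theorem mem_posB (R : List Int) (ps : List (Int × Int)) (acc : PySem.Set Int) (x : Int) :
    (x ∈ ps.foldl
      (fun pos p =>
        if p.1 < p.2 ∧ p.1 ∈ R ∧ p.2 ∈ R then PySem.Set.add (PySem.Set.add pos p.1) p.2 else pos)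
      acc)
    ↔ x ∈ acc ∨ ∃ p ∈ ps, (p.1 < p.2 ∧ p.1 ∈ R ∧ p.2 ∈ R) ∧ (x = p.1 ∨ x = p.2) := by
  induction ps generalizing acc with
  | nil => simp
  | cons q t ih =>
    simp only [List.foldl_cons, List.mem_cons]
    by_cases hq : q.1 < q.2 ∧ q.1 ∈ R ∧ q.2 ∈ R
    · rw [if_pos hq, ih]
      simp only [PySem.Set.mem_add]
      constructor
      · rintro (((h | h) | h) | ⟨p, hp, hc, hx⟩)
        · exact Or.inl h
        · exact Or.inr ⟨q, Or.inl rfl, hq, Or.inl h⟩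
        · exact Or.inr ⟨q, Or.inl rfl, hq, Or.inr h⟩
        · exact Or.inr ⟨p, Or.inr hp, hc, hx⟩
      · rintro (h | ⟨p, (rfl | hp), hc, hx⟩)
        · exact Or.inl (Or.inl (Or.inl h))
        · rcases hx with h | h
          · exact Or.inl (Or.inl (Or.inr h))
          · exact Or.inl (Or.inr h)
        · exact Or.inr ⟨p, hp, hc, hx⟩
    · rw [if_neg hq, ih]
      constructor
      · rintro (h | ⟨p, hp, hc, hx⟩)
        · exact Or.inl h
        · exact Or.inr ⟨p, Or.inr hp, hc, hx⟩
      · rintro (h | ⟨p, (rfl | hp), hc, hx⟩)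
        · exact Or.inl h
        · exact absurd hc hq
        · exact Or.inr ⟨p, hp, hc, hx⟩

-- A's inner loop characterised
theorem foundA_iff (g : Int) (ps : List (Int × Int)) (L : List Int) :
    pvFoundA g ps L = true ↔ ∃ h ∈ L, h ≠ g ∧ (if g < h then (g, h) else (h, g)) ∈ ps := by
  induction L with
  | nil => simp [pvFoundA]
  | cons h t ih =>
    simp only [pvFoundA]
    by_cases hg : h = g
    · subst hg
      rw [if_pos rfl, ih]
      constructor
      · rintro ⟨x, hx, hne, hm⟩; exact ⟨x, List.mem_cons_of_mem _ hx, hne, hm⟩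
      · rintro ⟨x, hx, hne, hm⟩
        rcases List.mem_cons.mp hx with rfl | hx
        · exact absurd rfl hne
        · exact ⟨x, hx, hne, hm⟩
    · rw [if_neg hg]
      by_cases hm : (if g < h then (g, h) else (h, g)) ∈ ps
      · simp only [hm, if_pos, true_iff]
        exact ⟨h, List.mem_cons_self .., hg, hm⟩
      · rw [if_neg hm, ih]
        constructor
        · rintro ⟨x, hx, hne, hmx⟩; exact ⟨x, List.mem_cons_of_mem _ hx, hne, hmx⟩
        · rintro ⟨x, hx, hne, hmx⟩
          rcases List.mem_cons.mp hx with rfl | hx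
          · exact absurd hmx hm
          · exact ⟨x, hx, hne, hmx⟩

-- A's outer loop: a Nodup traversal adding fresh elements is a filter
theorem foldlA_filter (c : Int → Bool) :
    ∀ (L : List Int) (acc : PySem.Set Int), L.Nodup → (∀ g ∈ L, g ∉ acc) →
    L.foldl (fun pos g => if c g then PySem.Set.add pos g else pos) acc = acc ++ L.filter c := by
  intro L
  induction L with
  | nil => intro acc _ _; simp
  | cons g t ih =>
    intro acc hnd hfresh
    have hgacc : g ∉ acc := hfresh g (List.mem_cons_self ..)
    have hnd' := (List.nodup_cons.mp hnd).2
    have hgt : g ∉ t := (List.nodup_cons.mp hnd).1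
    simp only [List.foldl_cons, List.filter_cons]
    by_cases hc : c g = true
    · rw [if_pos hc, if_pos hc]
      have hadd : PySem.Set.add acc g = acc ++ [g] := by
        simp [PySem.Set.add, PySem.Set.contains, List.contains_eq_mem, hgacc]
      rw [hadd, ih (acc ++ [g]) hnd' ?_]
      · simp
      · intro x hx
        simp only [List.mem_append, List.mem_singleton]
        rintro (h | rfl)
        · exact hfresh x (List.mem_cons_of_mem _ hx) h
        · exact hgt hx
    · rw [if_neg hc, if_neg hc]
      exact ih acc hnd' (fun x hx => hfresh x (List.mem_cons_of_mem _ hx))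

-- the two positivity conditions agree for g ∈ R
theorem cond_iff (R : List Int) (ps : List (Int × Int)) (g : Int) (hg : g ∈ R) :
    (∃ h ∈ R, h ≠ g ∧ (if g < h then (g, h) else (h, g)) ∈ ps)
    ↔ ∃ p ∈ ps, (p.1 < p.2 ∧ p.1 ∈ R ∧ p.2 ∈ R) ∧ (g = p.1 ∨ g = p.2) := by
  constructor
  · rintro ⟨h, hh, hne, hm⟩
    by_cases hlt : g < h
    · rw [if_pos hlt] at hm
      exact ⟨(g, h), hm, ⟨hlt, hg, hh⟩, Or.inl rfl⟩
    · rw [if_neg hlt] at hm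
      have : h < g := lt_of_le_of_ne (not_lt.mp hlt) hne
      exact ⟨(h, g), hm, ⟨this, hh, hg⟩, Or.inr rfl⟩
  · rintro ⟨p, hp, ⟨hlt, h1, h2⟩, rfl | rfl⟩
    · refine ⟨p.2, h2, ne_of_gt hlt, ?_⟩
      rw [if_pos hlt]; exact hp
    · refine ⟨p.1, h1, ne_of_lt hlt, ?_⟩
      rw [if_neg (not_lt.mpr (le_of_lt hlt))]; exact hp

-- ===== VERDICT (by name: the statement is the Claim_ definition above) =====
theorem positive_nodes_in_retrieved_py_spec : Claim_equal_positive_nodes_in_retrieved_py := by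
  intro R ps _ hpre
  unfold Spec_positive_nodes_in_retrieved_py
  unfold positive_nodes_in_retrieved_py positive_nodes_in_retrieved_py_alt
  rw [foldlA_filter (fun g => pvFoundA g ps R) R PySem.Set.empty hpre (by intro g _ h; simp [PySem.Set.empty] at h)]
  have hinter : ∀ (s : PySem.Set Int),
      PySem.Set.inter R s = R.filter (fun x => PySem.Set.contains s x) := by
    intro s; rfl
  rw [hinter]
  simp only [PySem.Set.empty, List.nil_append]
  apply List.filter_congr
  intro g hg
  rw [Bool.eq_iff_iff]
  simp only [foundA_iff, PySem.Set.contains, List.contains_eq_mem, decide_eq_true_eq,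
    mem_posB]
  constructor
  · intro h
    exact Or.inr ((cond_iff R ps g hg).mp h)
  · rintro (h | h)
    · simp at h
    · exact (cond_iff R ps g hg).mpr h
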